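-- pv_equiv track=rewrite | github.com/CamilleEscher/VideoRetrieval | learningProcess.py | whileOp
-- ===== SOURCE A (Python) =====
-- def whileOp(successors, posValues, negValues) :
-- 	posVector = []
-- 	negVector = []
-- 	for successorId in successors :
-- 		if successors[0] == successorId :
-- 			posVector = posValues[successorId]
-- 			negVector = negValues[successorId]
-- 		else :
-- 			posVector = [x + y for x, y in zip(posVector, posValues[successorId])]
-- 			negVector = [x + y for x, y in zip(negVector, negValues[successorId])]
-- 	return (posVector, negVector)
-- ===== SOURCE B (Python) =====
-- def whileOp(successors, posValues, negValues):
--     if not successors: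
--         return ([], [])
--     # Accumulation restarts whenever an element equals successors[0], so only the
--     # suffix starting at the LAST occurrence of successors[0] contributes.
--     start = len(successors) - 1 - successors[::-1].index(successors[0])
--     tail = successors[start:]
--
--     def total(values):
--         acc = values[tail[0]]
--         for s in tail[1:]:
--             acc = [x + y for x, y in zip(acc, values[s])]
--         return acc
--
--     return (total(posValues), total(negValues))
-- ===== Notes on version B (the rewrite author's own statement) =====
-- stated objective: simpler
-- what changed: Replaces A's single stateful loop that resets the accumulators each time an element equals successors[0] by a two-phase decomposition: locate the last occurrence of successors[0] (via reverse-index), then plainly zip-add the value vectors over that suffix.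
import Mathlib
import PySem

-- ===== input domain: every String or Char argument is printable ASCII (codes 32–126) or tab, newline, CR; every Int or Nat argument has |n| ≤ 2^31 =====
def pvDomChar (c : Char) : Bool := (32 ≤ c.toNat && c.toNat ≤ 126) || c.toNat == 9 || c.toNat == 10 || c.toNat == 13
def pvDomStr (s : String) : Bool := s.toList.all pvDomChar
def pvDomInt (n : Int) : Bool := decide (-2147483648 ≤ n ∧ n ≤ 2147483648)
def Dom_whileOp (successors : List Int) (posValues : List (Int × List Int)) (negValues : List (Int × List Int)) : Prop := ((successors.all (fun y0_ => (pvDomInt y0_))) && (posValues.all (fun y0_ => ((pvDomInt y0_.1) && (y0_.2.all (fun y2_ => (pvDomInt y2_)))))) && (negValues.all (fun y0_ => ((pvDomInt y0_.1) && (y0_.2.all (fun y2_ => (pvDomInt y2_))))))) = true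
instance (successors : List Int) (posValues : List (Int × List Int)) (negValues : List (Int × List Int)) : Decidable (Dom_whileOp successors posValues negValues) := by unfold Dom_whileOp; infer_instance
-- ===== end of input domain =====

-- B replaces A's single reset-on-value accumulating loop by: find the last occurrence of
-- successors[0], then plainly sum the value vectors over that suffix (objective: simpler decomposition).

-- ===== PORT A =====
-- [x + y for x, y in zip(a, b)]
def pvZipAdd (a b : List Int) : List Int := (a.zip b).map (fun p => p.1 + p.2)
-- values[k] for the dict parameter; total form: Pre_whileOp guarantees the key is present
def pvLook (values : List (Int × List Int)) (k : Int) : List Int :=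
  ((PySem.Dict.mk values).get? k).getD []

def whileOp (successors : List Int) (posValues : List (Int × List Int)) (negValues : List (Int × List Int)) : List Int × List Int :=
  -- successors[0]: the loop body only runs when successors is nonempty, so the default is never read
  successors.foldl
    (fun acc successorId =>
      if PySem.List.pyGetD successors 0 0 == successorId then
        (pvLook posValues successorId, pvLook negValues successorId)
      else
        (pvZipAdd acc.1 (pvLook posValues successorId),
         pvZipAdd acc.2 (pvLook negValues successorId)))
    ([], [])

-- ===== PORT B =====
-- total(values): acc = values[tail[0]]; then zip-add the rest ([] case unreachable: Source B's tail is nonempty)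
def pvSumFrom (values : List (Int × List Int)) (tail : List Int) : List Int :=
  match tail with
  | [] => []
  | t :: ts => ts.foldl (fun acc s => pvZipAdd acc (pvLook values s)) (pvLook values t)

def whileOp_alt (successors : List Int) (posValues : List (Int × List Int)) (negValues : List (Int × List Int)) : List Int × List Int :=
  match successors with
  | [] => ([], [])
  | h :: _ =>
    -- start = len(successors) - 1 - successors[::-1].index(successors[0]); index always succeeds since h ∈ successors
    let start : Int := (successors.length : Int) - 1 - ((PySem.List.index? successors.reverse h).getD 0 : Nat)
    let tail := PySem.List.slice successors (some start) none
    (pvSumFrom posValues tail, pvSumFrom negValues tail)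

-- ===== PRECONDITION & SPEC =====
-- Pre_ excludes exactly the inputs where Python A raises KeyError: some successor id missing from posValues or negValues.
def Pre_whileOp (successors : List Int) (posValues : List (Int × List Int)) (negValues : List (Int × List Int)) : Prop :=
  successors.all (fun s => ((PySem.Dict.mk posValues).get? s).isSome && ((PySem.Dict.mk negValues).get? s).isSome) = true
instance (successors : List Int) (posValues : List (Int × List Int)) (negValues : List (Int × List Int)) : Decidable (Pre_whileOp successors posValues negValues) := by unfold Pre_whileOp; infer_instance
def pvWitness_whileOp : List Int × (List (Int × List Int)) × (List (Int × List Int)) :=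
  ([1, 2, 1, 2], [(1, [1, 2]), (2, [3, 4])], [(1, [0, 1]), (2, [1, 1])])

def Spec_whileOp (successors : List Int) (posValues : List (Int × List Int)) (negValues : List (Int × List Int)) (out : List Int × List Int) : Prop := out = whileOp_alt successors posValues negValues
instance (successors : List Int) (posValues : List (Int × List Int)) (negValues : List (Int × List Int)) (out : List Int × List Int) : Decidable (Spec_whileOp successors posValues negValues out) := by unfold Spec_whileOp; infer_instance

-- ===== CLAIM (what is proved, stated in full; the proofs are below) =====
def Claim_equal_whileOp : Prop := ∀ (successors : List Int) (posValues : List (Int × List Int)) (negValues : List (Int × List Int)), Dom_whileOp successors posValues negValues → Pre_whileOp successors posValues negValues → Spec_whileOp successors posValues negValues (whileOp successors posValues negValues)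

-- ===== LEMMAS AND PROOFS =====

-- once no further reset value occurs, A's fold is the componentwise zip-add fold
theorem pvFold_noreset (pos neg : List (Int × List Int)) (h : Int) (l : List Int) (hnot : h ∉ l) (a b : List Int) :
    l.foldl
      (fun acc sid =>
        if h == sid then (pvLook pos sid, pvLook neg sid)
        else (pvZipAdd acc.1 (pvLook pos sid), pvZipAdd acc.2 (pvLook neg sid)))
      (a, b)
    = (l.foldl (fun acc s => pvZipAdd acc (pvLook pos s)) a,
       l.foldl (fun acc s => pvZipAdd acc (pvLook neg s)) b) := by
  induction l generalizing a b with
  | nil => rfl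
  | cons x xs ih =>
    have hx : ¬ (h == x) = true := by
      simp only [beq_iff_eq]
      rintro rfl; exact hnot (List.mem_cons_self ..)
    simp only [List.foldl_cons, if_neg hx]
    exact ih (fun hm => hnot (List.mem_cons_of_mem _ hm)) _ _

theorem whileOp_spec : Claim_equal_whileOp := by
  intro successors posValues negValues _ _
  unfold Spec_whileOp
  match hsucc : successors with
  | [] => rfl
  | h :: t =>
    -- locate the LAST occurrence of h via the first occurrence in the reverse
    have hmem : h ∈ (h :: t).reverse := by simp
    obtain ⟨k, hk⟩ := Option.isSome_iff_exists.mp (Iff.mpr (PySem.List.index?_isSome_iff _ _) hmem)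
    obtain ⟨pre, suf, hrev, hlen, hnotpre⟩ := Iff.mp (PySem.List.index?_eq_some_iff _ _ _) hk
    have hsplit : h :: t = suf.reverse ++ h :: pre.reverse := by
      have := congrArg List.reverse hrev
      simpa using this
    have hlensucc : (h :: t).length = suf.length + 1 + pre.length := by
      rw [hsplit]; simp [Nat.add_comm, Nat.add_left_comm]
    -- B's start is suf.length, so tail = h :: pre.reverse
    have hstart : ((h :: t).length : Int) - 1 - (k : Int) = (suf.length : Int) := by
      rw [hlensucc, ← hlen]; push_cast; ring
    have htail : PySem.List.slice (h :: t) (some (((h :: t).length : Int) - 1 - (k : Int))) none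
        = h :: pre.reverse := by
      rw [hstart, PySem.List.slice_from_natCast, hsplit]
      have : suf.length = suf.reverse.length := by simp
      rw [this, List.drop_left]
    -- A's fold over the split list
    have hA : whileOp (h :: t) posValues negValues
        = (pvSumFrom posValues (h :: pre.reverse), pvSumFrom negValues (h :: pre.reverse)) := by
      unfold whileOp
      simp only [PySem.List.pyGetD_zero_cons]
      conv_lhs => rw [hsplit]
      rw [List.foldl_append]
      simp only [List.foldl_cons, BEq.rfl, if_pos]
      have hnotprev : h ∉ pre.reverse := by simpa using hnotpre
      rw [pvFold_noreset posValues negValues h pre.reverse hnotprev]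
      rfl
    -- B's value
    have hB : whileOp_alt (h :: t) posValues negValues
        = (pvSumFrom posValues (h :: pre.reverse), pvSumFrom negValues (h :: pre.reverse)) := by
      unfold whileOp_alt
      simp only [hk, Option.getD_some]
      rw [htail]
    rw [hA, hB]
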